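-- pv_equiv track=rewrite | github.com/CCcassiusdjs/Systems_Security | calcular_chave_otimizada.py | calcular_chave_otimizada2
-- ===== SOURCE A (Python) =====
-- from collections import Counter
--
-- def calcular_chave_otimizada2(texto_cifrado, tamanho_chave, letra_mais_frequente_idioma):
--     chave_otimizada = ''
--     for i in range(tamanho_chave):
--         # Extrai o segmento do texto que corresponde à mesma posição da chave
--         segmento = texto_cifrado[i::tamanho_chave]
--
--         # Conta a frequência das letras no segmento
--         contador = Counter(segmento)
--
--         # Encontra a letra mais frequente no segmento
--         letra_mais_frequente = max(contador, key=contador.get)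
--
--         # Calcula o deslocamento da letra mais frequente até a letra mais frequente do idioma
--         deslocamento = ord(letra_mais_frequente) - ord(letra_mais_frequente_idioma)
--
--         # Corrige o deslocamento e adiciona à chave
--         chave_otimizada += chr((deslocamento + 26) % 26 + ord('a'))
--     return chave_otimizada
-- ===== SOURCE B (Python) =====
-- from collections import Counter
--
-- def calcular_chave_otimizada2(texto_cifrado, tamanho_chave, letra_mais_frequente_idioma):
--     if tamanho_chave <= 0:
--         return ''
--     # One linear pass: bucket each character by its position modulo the key length.
--     contadores = [Counter() for _ in range(tamanho_chave)]
--     for idx, ch in enumerate(texto_cifrado):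
--         contadores[idx % tamanho_chave][ch] += 1
--     base = ord(letra_mais_frequente_idioma)
--     chave = []
--     for contador in contadores:
--         letra = max(contador, key=contador.get)
--         chave.append(chr((ord(letra) - base + 26) % 26 + ord('a')))
--     return ''.join(chave)
-- ===== Notes on version B (the rewrite author's own statement) =====
-- stated objective: alternative
-- what changed: Replaces per-column extended slicing (one pass over the text for every key position) by a single enumerate pass that buckets character counts into one Counter per key position, followed by a separate decode pass over the buckets.
import Mathlib
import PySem

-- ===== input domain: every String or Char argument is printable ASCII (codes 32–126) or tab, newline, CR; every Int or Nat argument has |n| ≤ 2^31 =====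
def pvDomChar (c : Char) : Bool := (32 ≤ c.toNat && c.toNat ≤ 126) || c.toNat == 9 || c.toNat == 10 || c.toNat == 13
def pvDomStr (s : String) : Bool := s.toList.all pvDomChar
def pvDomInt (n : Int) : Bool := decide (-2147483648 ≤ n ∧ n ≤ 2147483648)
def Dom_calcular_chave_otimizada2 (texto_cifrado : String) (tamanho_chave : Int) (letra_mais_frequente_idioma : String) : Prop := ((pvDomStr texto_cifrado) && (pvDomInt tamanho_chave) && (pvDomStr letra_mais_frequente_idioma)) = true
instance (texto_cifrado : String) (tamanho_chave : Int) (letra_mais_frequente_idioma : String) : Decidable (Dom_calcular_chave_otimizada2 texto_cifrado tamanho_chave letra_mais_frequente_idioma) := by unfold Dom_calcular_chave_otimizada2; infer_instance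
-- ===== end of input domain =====

-- ===== PORT A =====
-- B changes the decomposition: one bucketing pass over the text instead of per-column slicing (objective: alternative).

-- shared by both ports: chr((ord(letra) - ord(lmfi)) + 26) % 26 + ord('a')); Pre_ guarantees lmfi has length 1,
-- so headD is exact there (Python ord raises TypeError otherwise).
def pvDecode (letra : Char) (lmfi : String) : Char :=
  Char.ofNat ((PySem.Int.mod (((letra.toNat : Int) - ((lmfi.toList.headD 'a').toNat : Int)) + 26) 26).toNat + 97)

def calcular_chave_otimizada2 (texto_cifrado : String) (tamanho_chave : Int) (letra_mais_frequente_idioma : String) : String :=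
  String.ofList ((PySem.List.pyRange 0 tamanho_chave 1).foldl (fun acc i =>
    -- segmento = texto_cifrado[i::tamanho_chave]  (step ≠ 0 whenever the loop runs, so getD [] is exact)
    let segmento := (PySem.List.slice? texto_cifrado.toList (some i) none tamanho_chave).getD []
    let contador := PySem.Dict.counter segmento
    -- max(contador, key=contador.get): first key (insertion order) with maximal count; empty Counter = ValueError (excluded by Pre_)
    acc ++ [match PySem.List.max? contador.keys (fun k => contador.getD k 0) with
            | some letra => pvDecode letra letra_mais_frequente_idioma
            | none => 'a']) [])  -- none = empty segment: Python max() raises ValueError (excluded by Pre_)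

-- ===== PORT B =====
def calcular_chave_otimizada2_alt (texto_cifrado : String) (tamanho_chave : Int) (letra_mais_frequente_idioma : String) : String :=
  if tamanho_chave <= 0 then "" else
  -- one linear pass: counters[idx % tamanho_chave][ch] += 1
  let contadores := (PySem.List.enumerate texto_cifrado.toList 0).foldl
    (fun cs p => cs.modify (PySem.Int.mod p.1 tamanho_chave).toNat (fun d => d.modify p.2 0 (· + 1)))
    (List.replicate tamanho_chave.toNat (PySem.Dict.empty : PySem.Dict Char Int))
  String.ofList (contadores.map (fun contador =>
    match PySem.List.max? contador.keys (fun k => contador.getD k 0) with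
    | some letra => pvDecode letra letra_mais_frequente_idioma
    | none => 'a'))  -- max() of an empty Counter raises ValueError in Python (excluded by Pre_)

-- ===== PRECONDITION & SPEC =====
-- Pre_ excludes exactly the inputs where Python A raises: a positive key length longer than the text
-- (some column segment is empty, so max() raises ValueError), or a positive key length with
-- letra_mais_frequente_idioma not a single character (ord() raises TypeError).
def Pre_calcular_chave_otimizada2 (texto_cifrado : String) (tamanho_chave : Int) (letra_mais_frequente_idioma : String) : Prop :=
  tamanho_chave ≤ 0 ∨ (tamanho_chave ≤ (texto_cifrado.toList.length : Int) ∧ letra_mais_frequente_idioma.toList.length = 1)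
instance (texto_cifrado : String) (tamanho_chave : Int) (letra_mais_frequente_idioma : String) : Decidable (Pre_calcular_chave_otimizada2 texto_cifrado tamanho_chave letra_mais_frequente_idioma) := by unfold Pre_calcular_chave_otimizada2; infer_instance
def pvWitness_calcular_chave_otimizada2 : String × Int × String := ("abcabd", 3, "e")
def Spec_calcular_chave_otimizada2 (texto_cifrado : String) (tamanho_chave : Int) (letra_mais_frequente_idioma : String) (out : String) : Prop := out = calcular_chave_otimizada2_alt texto_cifrado tamanho_chave letra_mais_frequente_idioma
instance (texto_cifrado : String) (tamanho_chave : Int) (letra_mais_frequente_idioma : String) (out : String) : Decidable (Spec_calcular_chave_otimizada2 texto_cifrado tamanho_chave letra_mais_frequente_idioma out) := by unfold Spec_calcular_chave_otimizada2; infer_instance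

-- ===== CLAIM (what is proved, stated in full; the proofs are below) =====
def Claim_equal_calcular_chave_otimizada2 : Prop := ∀ (texto_cifrado : String) (tamanho_chave : Int) (letra_mais_frequente_idioma : String), Dom_calcular_chave_otimizada2 texto_cifrado tamanho_chave letra_mais_frequente_idioma → Pre_calcular_chave_otimizada2 texto_cifrado tamanho_chave letra_mais_frequente_idioma → Spec_calcular_chave_otimizada2 texto_cifrado tamanho_chave letra_mais_frequente_idioma (calcular_chave_otimizada2 texto_cifrado tamanho_chave letra_mais_frequente_idioma)

-- ===== LEMMAS AND PROOFS =====

-- every t-th element, starting at the head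
def pvTakeEvery {A : Type} (t : Nat) : List A -> List A
  | [] => []
  | x :: xs => x :: pvTakeEvery t (xs.drop (t - 1))
termination_by l => l.length
decreasing_by simp

-- the characters of l whose global position p (starting at s) satisfies p % t == j
def pvCol (t : Int) (j : Nat) : List Char -> Int -> List Char
  | [], _ => []
  | x :: xs, s => if (PySem.Int.mod s t).toNat = j then x :: pvCol t j xs (s + 1) else pvCol t j xs (s + 1)

lemma pvPyRange_nonpos (t : Int) (ht : t ≤ 0) : PySem.List.pyRange 0 t 1 = [] := by
  simp [PySem.List.pyRange]
  omega

lemma pvFMR {A : Type} (t : Nat) (ht : 0 < t) (l : List A) :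
    (List.range ((l.length + t - 1) / t)).filterMap (fun k => l[t * k]?) = pvTakeEvery t l := by
  induction l using pvTakeEvery.induct t with
  | case1 => simp [pvTakeEvery]
  | case2 x xs ih =>
    have hc : (List.length (x :: xs) + t - 1) / t = xs.length / t + 1 := by
      simp only [List.length_cons]
      have : xs.length + 1 + t - 1 = xs.length + t := by omega
      rw [this, Nat.add_div_right _ ht]
    have hc2 : xs.length / t = ((xs.drop (t-1)).length + t - 1) / t := by
      simp only [List.length_drop]
      rcases Nat.lt_or_ge xs.length (t - 1) with h | h
      · rw [Nat.div_eq_of_lt (by omega), Nat.div_eq_of_lt (by omega)]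
      · congr 1; omega
    rw [hc, List.range_succ_eq_map, List.filterMap_cons]
    simp only [Nat.mul_zero, List.getElem?_cons_zero, List.filterMap_map]
    rw [pvTakeEvery]
    congr 1
    rw [hc2] at *
    rw [← ih]
    apply List.filterMap_congr
    intro k _
    simp only [Function.comp]
    rw [List.getElem?_drop]
    have h2 : t * (k + 1) = t * k + t := by ring
    have : t * (k + 1) = (t - 1 + t * k) + 1 := by omega
    rw [Nat.succ_eq_add_one, this, List.getElem?_cons_succ]

lemma pvSlice (l : List Char) (t : Int) (ht : 0 < t) (j : Nat) (hj : (j : Int) < t) (hjl : j ≤ l.length) :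
    PySem.List.slice? l (some (j : Int)) none t = some (pvTakeEvery t.toNat (l.drop j)) := by
  simp only [PySem.List.slice?, PySem.List.sliceIndices]
  rw [if_neg (by omega : ¬ t = 0)]
  simp only [if_neg (by omega : ¬ t < 0), if_neg (by omega : ¬ (j:Int) < 0), if_pos ht]
  rw [min_eq_left (by exact_mod_cast hjl)]
  rcases Nat.lt_or_ge j l.length with h | h
  · congr 1
    obtain ⟨n, rfl⟩ : ∃ n : Nat, t = (n : Int) := ⟨t.toNat, (Int.toNat_of_nonneg (by omega)).symm⟩
    have hn : 0 < n := by exact_mod_cast ht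
    have hcast : ((l.length : Int) - j + n - 1) = ((l.length - j + n - 1 : Nat) : Int) := by
      omega
    rw [hcast, ← Int.natCast_ediv, Int.toNat_natCast, Int.toNat_natCast]
    have hcnt : (l.length - j + n - 1) / n = ((l.drop j).length + n - 1) / n := by
      rw [List.length_drop]
    rw [hcnt, if_pos (show ((j:Int)) < (l.length:Int) by exact_mod_cast h)]
    rw [← pvFMR n hn (l.drop j)]
    apply List.filterMap_congr
    intro k _
    rw [List.getElem?_drop]
    norm_cast
  · have hje : j = l.length := by omega
    subst hje
    have : ((l.length : Int) - l.length + t - 1) / t = 0 := by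
      apply Int.ediv_eq_zero_of_lt <;> omega
    rw [this]
    simp [pvTakeEvery]

lemma pvCol_eq (t : Int) (ht : 0 < t) (j : Nat) (hj : (j : Int) < t) :
    ∀ (l : List Char) (s : Int),
      pvCol t j l s = pvTakeEvery t.toNat (l.drop ((PySem.Int.mod ((j : Int) - s) t).toNat)) := by
  intro l
  induction l with
  | nil => intro s; simp [pvCol, pvTakeEvery]
  | cons x xs ih =>
    intro s
    rw [PySem.Int.mod_eq_emod_of_pos ht]
    have hD0 : 0 ≤ ((j : Int) - s) % t := Int.emod_nonneg _ (by omega)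
    have hDt : ((j : Int) - s) % t < t := Int.emod_lt_of_pos _ ht
    have hs0 : 0 ≤ s % t := Int.emod_nonneg _ (by omega)
    have hst : s % t < t := Int.emod_lt_of_pos _ ht
    have hjj : (j : Int) % t = j := Int.emod_eq_of_lt (by omega) hj
    have key : ((j : Int) - s) % t = ((j : Int) - s % t) % t := by
      rw [Int.sub_emod, hjj]
    have hiff : (s % t).toNat = j ↔ ((j : Int) - s) % t = 0 := by
      rw [key]
      constructor
      · intro h
        have hjr : (j : Int) = s % t := by omega
        rw [hjr]
        simp
      · intro h
        by_contra hne
        have hjr : (j : Int) ≠ s % t := by omega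
        rcases lt_or_gt_of_ne hjr with hlt | hgt
        · have h1 : ((j : Int) - s % t + t) % t = (j : Int) - s % t + t :=
            Int.emod_eq_of_lt (by omega) (by omega)
          have h2 : ((j : Int) - s % t + t) % t = ((j : Int) - s % t) % t :=
            Int.add_emod_right _ _
          omega
        · have : ((j : Int) - s % t) % t = (j : Int) - s % t :=
            Int.emod_eq_of_lt (by omega) (by omega)
          omega
    by_cases hc : (s % t).toNat = j
    · rw [pvCol, PySem.Int.mod_eq_emod_of_pos ht, if_pos hc]
      have hD : ((j : Int) - s) % t = 0 := hiff.mp hc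
      rw [hD]
      simp only [Int.toNat_zero, List.drop_zero]
      rw [pvTakeEvery]
      congr 1
      rw [ih (s + 1)]
      simp only [PySem.Int.mod_eq_emod_of_pos ht]
      congr 2
      obtain ⟨m, hm⟩ := Int.dvd_of_emod_eq_zero hD
      have : (j : Int) - (s + 1) = (t - 1) + t * (m - 1) := by
        rw [show (j:Int) - (s+1) = ((j:Int) - s) - 1 by ring, hm]; ring
      rw [this, Int.add_mul_emod_self_left, Int.emod_eq_of_lt (by omega) (by omega)]
      omega
    · rw [pvCol, PySem.Int.mod_eq_emod_of_pos ht, if_neg hc]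
      have hD : 0 < ((j : Int) - s) % t := by
        rcases Nat.lt_or_ge 0 (((j : Int) - s) % t).toNat with h | h
        · omega
        · exfalso; exact hc (hiff.mpr (by omega))
      rw [ih (s + 1)]
      simp only [PySem.Int.mod_eq_emod_of_pos ht]
      have harith : ((j : Int) - (s + 1)) % t = ((j : Int) - s) % t - 1 := by
        have hm := Int.emod_add_mul_ediv ((j : Int) - s) t
        have : (j : Int) - (s + 1) = (((j : Int) - s) % t - 1) + t * (((j : Int) - s) / t) := by omega
        rw [this, Int.add_mul_emod_self_left, Int.emod_eq_of_lt (by omega) (by omega)]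
      rw [harith]
      have hdrop : (((j : Int) - s) % t).toNat = ((((j : Int) - s) % t - 1).toNat) + 1 := by omega
      rw [hdrop, List.drop_succ_cons]

lemma pvMapRangeGetD {A : Type} (e : A) (bs : List A) (n : Nat) (h : bs.length = n) :
    (List.range n).map (fun j => bs.getD j e) = bs := by
  apply List.ext_getElem
  · simp [h]
  · intro k h1 h2
    simp only [List.getElem_map, List.getElem_range]
    rw [List.getD_eq_getElem _ _ (by simp at h1; omega)]

lemma pvBuckets (t : Int) (ht : 0 < t) :
    ∀ (l : List Char) (s : Int) (bs : List (PySem.Dict Char Int)), bs.length = t.toNat →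
      (PySem.List.enumerate l s).foldl
          (fun cs p => cs.modify (PySem.Int.mod p.1 t).toNat (fun d => d.modify p.2 0 (· + 1))) bs
        = (List.range t.toNat).map
            (fun j => (pvCol t j l s).foldl (fun d c => d.modify c 0 (· + 1)) (bs.getD j PySem.Dict.empty)) := by
  intro l
  induction l with
  | nil =>
    intro s bs hlen
    simp only [PySem.List.enumerate_nil, List.foldl_nil, pvCol]
    exact (pvMapRangeGetD _ bs _ hlen).symm
  | cons x xs ih =>
    intro s bs hlen
    rw [PySem.List.enumerate_cons, List.foldl_cons]
    have hj0lt : (PySem.Int.mod s t).toNat < t.toNat := by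
      have h1 := PySem.Int.mod_nonneg s ht
      have h2 := PySem.Int.mod_lt s ht
      omega
    rw [ih (s + 1) _ (by rw [List.length_modify]; exact hlen)]
    apply List.map_congr_left
    intro j hj
    have hjn : j < t.toNat := List.mem_range.mp hj
    by_cases hc : (PySem.Int.mod s t).toNat = j
    · rw [pvCol, if_pos hc, List.foldl_cons]
      congr 1
      have : (bs.modify (PySem.Int.mod s t).toNat (fun d => d.modify x 0 (· + 1))).getD j PySem.Dict.empty
          = (bs.getD j PySem.Dict.empty).modify x 0 (· + 1) := by
        rw [hc]
        have hjbs : j < bs.length := by omega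
        rw [List.getD_eq_getElem _ _ (by rw [List.length_modify]; omega),
            List.getD_eq_getElem _ _ hjbs]
        rw [List.getElem_modify]
        simp
      rw [this]
    · rw [pvCol, if_neg hc]
      congr 1
      have hjbs : j < bs.length := by omega
      rw [List.getD_eq_getElem _ _ (by rw [List.length_modify]; omega),
          List.getD_eq_getElem _ _ hjbs]
      rw [List.getElem_modify]
      simp [hc]

-- ===== VERDICT (by name: the statement is the Claim_ definition above) =====
theorem calcular_chave_otimizada2_spec : Claim_equal_calcular_chave_otimizada2 := by
  intro texto t lmfi _hdom hpre
  unfold Spec_calcular_chave_otimizada2 calcular_chave_otimizada2 calcular_chave_otimizada2_alt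
  by_cases ht : t ≤ 0
  · rw [if_pos (by exact_mod_cast ht), pvPyRange_nonpos t ht]
    rfl
  · have ht' : 0 < t := by omega
    have hlen : t ≤ (texto.toList.length : Int) := by
      rcases hpre with h | ⟨h, _⟩
      · omega
      · exact h
    rw [if_neg (by exact_mod_cast ht)]
    dsimp only
    have hb := pvBuckets t ht' texto.toList 0 (List.replicate t.toNat PySem.Dict.empty) (by rw [List.length_replicate])
    rw [hb]
    rw [List.map_map]
    have hA : PySem.List.pyRange 0 t 1 = List.map (fun k : Nat => (k : Int)) (List.range t.toNat) := by
      have h := PySem.List.pyRange_zero_natCast t.toNat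
      rwa [Int.toNat_of_nonneg (by omega : (0:Int) ≤ t)] at h
    rw [PySem.List.foldl_append_singleton_eq_map, hA, List.map_map]
    simp only [List.nil_append]
    congr 1
    apply List.map_congr_left
    intro j hj
    have hjn : j < t.toNat := List.mem_range.mp hj
    have hjt : (j : Int) < t := by omega
    have hjl : j ≤ texto.toList.length := by omega
    have hseg : (PySem.List.slice? texto.toList (some (j : Int)) none t).getD []
        = pvCol t j texto.toList 0 := by
      rw [pvSlice texto.toList t ht' j hjt hjl, Option.getD_some, pvCol_eq t ht' j hjt texto.toList 0]
      congr 2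
      rw [PySem.Int.mod_eq_emod_of_pos ht', sub_zero, Int.emod_eq_of_lt (by omega) hjt]
      omega
    have hcnt : (pvCol t j texto.toList 0).foldl (fun d c => d.modify c 0 (· + 1)) ((List.replicate t.toNat PySem.Dict.empty).getD j PySem.Dict.empty)
        = PySem.Dict.counter (pvCol t j texto.toList 0) := by
      rw [List.getD_eq_getElem _ _ (by rw [List.length_replicate]; omega), List.getElem_replicate,
        PySem.Dict.counter_eq_foldl]
    simp only [Function.comp]
    rw [hcnt, hseg]
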